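-- pv_equiv track=rewrite | github.com/themuuln/tmux-workspace-sidebar | tmux_workspace_sidebar/navigation.py | flatten_window_targets
-- ===== SOURCE A (Python) =====
-- from typing import Iterable, List, Optional, Sequence, Tuple
--
-- WindowTarget = Tuple[str, str]
--
-- def flatten_window_targets(
--     session_order: Sequence[str],
--     window_rows: Iterable[Tuple[str, str, int]],
-- ) -> List[WindowTarget]:
--     windows_by_session: dict[str, list[Tuple[int, str]]] = {session_id: [] for session_id in session_order}
--
--     for session_id, window_id, window_index in window_rows:
--         windows_by_session.setdefault(session_id, []).append((window_index, window_id))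
--
--     ordered_targets: List[WindowTarget] = []
--     for session_id in session_order:
--         windows = sorted(windows_by_session.get(session_id, []), key=lambda item: item[0])
--         ordered_targets.extend((session_id, window_id) for _, window_id in windows)
--
--     return ordered_targets
-- ===== SOURCE B (Python) =====
-- def flatten_window_targets(session_order, window_rows):
--     rows = list(window_rows)
--     result = []
--     for session_id in session_order:
--         matches = sorted((r for r in rows if r[0] == session_id), key=lambda r: r[2])
--         result.extend((session_id, r[1]) for r in matches)
--     return result
-- ===== Notes on version B (the rewrite author's own statement) =====
-- stated objective: simpler
-- what changed: A builds a dict of per-session buckets of (index, window_id) pairs in two passes and then sorts each bucket; B uses no dict at all: for each session in order it filters the row list directly, stable-sorts the matching rows by window index, and emits (session_id, window_id) pairs.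
import Mathlib
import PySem

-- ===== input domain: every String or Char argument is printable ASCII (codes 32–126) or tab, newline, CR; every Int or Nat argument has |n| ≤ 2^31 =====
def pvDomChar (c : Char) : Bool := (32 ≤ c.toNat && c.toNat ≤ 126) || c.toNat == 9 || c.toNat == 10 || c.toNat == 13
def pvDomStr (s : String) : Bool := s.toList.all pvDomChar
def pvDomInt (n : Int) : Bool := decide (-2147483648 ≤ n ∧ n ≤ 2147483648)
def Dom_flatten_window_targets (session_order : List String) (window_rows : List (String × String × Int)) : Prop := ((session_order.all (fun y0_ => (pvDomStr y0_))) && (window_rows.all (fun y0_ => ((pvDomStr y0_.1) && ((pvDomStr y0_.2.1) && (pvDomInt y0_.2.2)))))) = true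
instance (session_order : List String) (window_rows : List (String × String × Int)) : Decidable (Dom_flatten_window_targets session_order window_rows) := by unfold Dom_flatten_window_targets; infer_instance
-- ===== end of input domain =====

-- B drops A's dict of per-session buckets entirely: it filters the row list per session and
-- stable-sorts the matching rows directly (objective: simpler; not faster).

-- ===== PORT A =====
-- dict comprehension {sid: [] for sid in session_order}, then
-- windows_by_session.setdefault(sid, []).append((idx, wid))  =  Dict.modify sid [] (· ++ [(idx, wid)])
def flatten_window_targets (session_order : List String) (window_rows : List (String × String × Int)) : List (String × String) :=
  let init : PySem.Dict String (List (Int × String)) :=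
    session_order.foldl (fun d sid => d.insert sid []) PySem.Dict.empty
  let windows_by_session : PySem.Dict String (List (Int × String)) :=
    window_rows.foldl (fun d r => d.modify r.1 [] (fun l => l ++ [(r.2.2, r.2.1)])) init
  session_order.foldl
    (fun acc sid =>
      acc ++ (PySem.List.sorted (windows_by_session.getD sid []) (fun item => item.1)).map
        (fun p => (sid, p.2)))
    []

-- ===== PORT B =====
-- 'sorted((r for r in rows if r[0] == session_id), key=lambda r: r[2])' = sorted of the filter;
-- result.extend(...) = append of the mapped matches
def flatten_window_targets_alt (session_order : List String) (window_rows : List (String × String × Int)) : List (String × String) :=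
  session_order.foldl
    (fun result session_id =>
      let hits := PySem.List.sorted (window_rows.filter (fun r => r.1 == session_id))
        (fun r => r.2.2)
      result ++ hits.map (fun r => (session_id, r.2.1)))
    []

-- ===== PRECONDITION & SPEC =====
def Spec_flatten_window_targets (session_order : List String) (window_rows : List (String × String × Int)) (out : List (String × String)) : Prop := out = flatten_window_targets_alt session_order window_rows
instance (session_order : List String) (window_rows : List (String × String × Int)) (out : List (String × String)) : Decidable (Spec_flatten_window_targets session_order window_rows out) := by unfold Spec_flatten_window_targets; infer_instance

-- ===== CLAIM (what is proved, stated in full; the proofs are below) =====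
def Claim_equal_flatten_window_targets : Prop := ∀ (session_order : List String) (window_rows : List (String × String × Int)), Dom_flatten_window_targets session_order window_rows → Spec_flatten_window_targets session_order window_rows (flatten_window_targets session_order window_rows)

-- ===== LEMMAS AND PROOFS =====

-- A's dict-comprehension init: every lookup with default [] is []
theorem getD_init_nil (ss : List String) (d : PySem.Dict String (List (Int × String)))
    (h : ∀ s, d.getD s [] = []) (s : String) :
    (ss.foldl (fun d sid => d.insert sid []) d).getD s [] = [] := by
  induction ss generalizing d with
  | nil => simpa using h s
  | cons a t ih =>
    simp only [List.foldl_cons]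
    apply ih
    intro s'
    by_cases hs : s' = a
    · subst hs; simp [PySem.Dict.getD, PySem.Dict.get?_insert_self]
    · have := h s'
      simp [PySem.Dict.getD, PySem.Dict.get?_insert_of_ne _ _ hs] at this ⊢
      exact this

-- A's grouping loop: each lookup is the filtered, mapped rows
theorem getD_group {ν : Type} (rows : List (String × String × Int))
    (d : PySem.Dict String (List ν)) (v : String × String × Int → ν) (s : String) :
    (rows.foldl (fun d r => d.modify r.1 [] (fun l => l ++ [v r])) d).getD s [] =
      d.getD s [] ++ (rows.filter (fun r => r.1 == s)).map v := by
  induction rows generalizing d with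
  | nil => simp
  | cons r t ih =>
    simp only [List.foldl_cons, ih, List.filter_cons]
    by_cases hs : r.1 = s
    · subst hs
      simp [PySem.Dict.modify, PySem.Dict.getD, PySem.Dict.get?_insert_self]
    · have : (r.1 == s) = false := by simpa using hs
      simp [this, PySem.Dict.modify, PySem.Dict.getD,
        PySem.Dict.get?_insert_of_ne _ _ (Ne.symm hs)]

theorem insertBy_map {α β κ : Type} [LinearOrder κ] (f : α → β) (key : α → κ) (key' : β → κ)
    (h : ∀ a, key' (f a) = key a) (x : α) (ys : List α) :
    (PySem.List.insertBy (fun a b => decide (key a < key b)) x ys).map f =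
      PySem.List.insertBy (fun a b => decide (key' a < key' b)) (f x) (ys.map f) := by
  induction ys with
  | nil => simp [PySem.List.insertBy]
  | cons y t ih =>
    simp only [PySem.List.insertBy, List.map_cons, h]
    by_cases hb : key x < key y
    · simp [hb]
    · simp [hb, ih]

-- a stable sort commutes with a key-preserving map
theorem sorted_map {α β κ : Type} [LinearOrder κ] (f : α → β) (key : α → κ) (key' : β → κ)
    (h : ∀ a, key' (f a) = key a) (xs : List α) :
    (PySem.List.sorted xs key).map f = PySem.List.sorted (xs.map f) key' := by
  rw [PySem.List.sorted_eq_foldl_insertBy, PySem.List.sorted_eq_foldl_insertBy]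
  suffices H : ∀ (acc : List α),
      (xs.foldl (fun acc x => PySem.List.insertBy (fun a b => decide (key a < key b)) x acc) acc).map f =
      (xs.map f).foldl (fun acc y => PySem.List.insertBy (fun a b => decide (key' a < key' b)) y acc) (acc.map f) by
    simpa using H []
  induction xs with
  | nil => simp
  | cons x t ih =>
    intro acc
    simp only [List.foldl_cons, List.map_cons, ih, insertBy_map f key key' h]

-- ===== VERDICT (by name: the statement is the Claim_ definition above) =====
theorem flatten_window_targets_spec : Claim_equal_flatten_window_targets := by
  intro ss rows _
  unfold Spec_flatten_window_targets flatten_window_targets flatten_window_targets_alt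
  dsimp only
  apply PySem.List.foldl_congr_mem
  intro acc sid _
  rw [getD_group rows _ (fun r => (r.2.2, r.2.1)) sid,
      getD_init_nil ss PySem.Dict.empty (fun s => by
        simp [PySem.Dict.getD, PySem.Dict.get?, PySem.Dict.empty]) sid,
      List.nil_append]
  have hm := sorted_map (f := fun r : String × String × Int => ((r.2.2, r.2.1) : Int × String))
    (key := fun r : String × String × Int => r.2.2) (key' := fun item : Int × String => item.1)
    (fun a => rfl) (rows.filter (fun r => r.1 == sid))
  rw [← hm]
  simp [List.map_map, Function.comp]
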